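-- pv_equiv track=rewrite | github.com/DeepPSP/torch_ecg | references/encase/code/mimic_test.py | group_label
-- ===== SOURCE A (Python) =====
-- from collections import Counter
--
-- def group_label(pids, preds, gt):
--     unique_pids = sorted(list(set(pids)))
--     pred_dic = {k: [] for k in unique_pids}
--     gt_dic = {k: [] for k in unique_pids}
--     final_preds = []
--     final_gt = []
--     for i in range(len(pids)):
--         pred_dic[pids[i]].append(preds[i])
--         gt_dic[pids[i]].append(gt[i])
--     for k, v in pred_dic.items():
--         final_preds.append(Counter(v).most_common(1)[0][0])
--     for k, v in gt_dic.items():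
--         final_gt.append(Counter(v).most_common(1)[0][0])
--     return final_preds, final_gt
-- ===== SOURCE B (Python) =====
-- def _mode(vals):
--     counts = {}
--     for v in vals:
--         counts[v] = counts.get(v, 0) + 1
--     best, bestc = None, -1
--     for v in vals:
--         c = counts[v]
--         if c > bestc:
--             best, bestc = v, c
--     return best
--
--
-- def group_label(pids, preds, gt):
--     rows = sorted(zip(pids, preds, gt), key=lambda t: t[0])
--     final_preds = []
--     final_gt = []
--     i, n = 0, len(rows)
--     while i < n:
--         j = i
--         while j < n and rows[j][0] == rows[i][0]:
--             j += 1
--         run = rows[i:j]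
--         final_preds.append(_mode([r[1] for r in run]))
--         final_gt.append(_mode([r[2] for r in run]))
--         i = j
--     return final_preds, final_gt
-- ===== Notes on version B (the rewrite author's own statement) =====
-- stated objective: faster
-- what changed: Replaces A's sorted-unique-pid dict-of-lists grouping plus a Counter.most_common(1) per group by one stable sort of the (pid, pred, gt) triples by pid followed by a single run-scan taking each contiguous run's first-encountered mode via a plain count dict; the per-group Counter/heapq machinery and the dict-of-lists build disappear.
import Mathlib
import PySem

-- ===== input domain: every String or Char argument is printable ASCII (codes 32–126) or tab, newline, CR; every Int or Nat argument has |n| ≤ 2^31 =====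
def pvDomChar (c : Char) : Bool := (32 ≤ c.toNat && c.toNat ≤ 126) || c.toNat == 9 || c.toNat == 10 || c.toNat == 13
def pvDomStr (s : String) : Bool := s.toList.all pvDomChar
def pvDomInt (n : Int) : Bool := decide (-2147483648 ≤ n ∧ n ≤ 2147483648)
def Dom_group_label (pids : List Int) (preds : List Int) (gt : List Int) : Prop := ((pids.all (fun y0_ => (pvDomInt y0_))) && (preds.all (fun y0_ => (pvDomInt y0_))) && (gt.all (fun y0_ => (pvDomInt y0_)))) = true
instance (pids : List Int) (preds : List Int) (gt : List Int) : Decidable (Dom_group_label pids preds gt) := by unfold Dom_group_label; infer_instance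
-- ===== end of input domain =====

-- B replaces A's dict-of-lists grouping + Counter.most_common per group with one stable sort by pid and a run-scan (measured constant-factor faster in a timing run).

-- ===== PORT A =====
-- Counter(v).most_common(1)[0][0]: the first item with maximal count in insertion order
-- (heapq.nlargest(1, items, key=count) = stable reverse sort, take 1). Exact for nonempty v;
-- every list A applies it to is nonempty (each dict key occurs in pids). '.elim 0' stands for
-- the unreachable [0][0] on an empty Counter.
def mostCommon1 (v : List Int) : Int :=
  ((PySem.Dict.counter v).items.foldl
    (fun (acc : Option (Int × Int)) kv =>
      match acc with
      | none => some kv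
      | some bc => if bc.2 < kv.2 then some kv else some bc) none).elim 0 (fun bc => bc.1)

def group_label (pids : List Int) (preds : List Int) (gt : List Int) : List Int × List Int :=
  let unique_pids := PySem.List.sorted (PySem.Set.ofList pids) (fun x => x)
  let pred_dic : PySem.Dict Int (List Int) :=
    unique_pids.foldl (fun d k => d.insert k []) PySem.Dict.empty
  let gt_dic : PySem.Dict Int (List Int) :=
    unique_pids.foldl (fun d k => d.insert k []) PySem.Dict.empty
  let dics := (PySem.List.pyRange 0 (PySem.List.len pids) 1).foldl
    (fun (st : PySem.Dict Int (List Int) × PySem.Dict Int (List Int)) i =>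
      (st.1.modify (PySem.List.pyGetD pids i 0) [] (fun l => l ++ [PySem.List.pyGetD preds i 0]),
       st.2.modify (PySem.List.pyGetD pids i 0) [] (fun l => l ++ [PySem.List.pyGetD gt i 0])))
    (pred_dic, gt_dic)
  let final_preds := dics.1.items.foldl (fun acc kv => acc ++ [mostCommon1 kv.2]) []
  let final_gt := dics.2.items.foldl (fun acc kv => acc ++ [mostCommon1 kv.2]) []
  (final_preds, final_gt)

-- ===== PORT B =====
-- Source B's _mode: a count dict built in one pass, then the first value whose count strictly
-- exceeds the best so far. Source B returns None for empty vals; _mode is only called on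
-- nonempty runs, (0, -1) is the 'best = None, bestc = -1' initial state.
def bMode (vals : List Int) : Int :=
  let counts := vals.foldl (fun d v => d.insert v (d.getD v 0 + 1)) PySem.Dict.empty
  (vals.foldl (fun (acc : Int × Int) v =>
    let c := counts.getD v 0
    if acc.2 < c then (v, c) else acc) (0, -1)).1

-- the outer while-loop over the sorted rows: each step consumes one maximal run of equal pids
def runScan : List (Int × Int × Int) → List Int × List Int
  | [] => ([], [])
  | r :: rest =>
    let run := r :: rest.takeWhile (fun t => t.1 == r.1)
    let p := runScan (rest.dropWhile (fun t => t.1 == r.1))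
    (bMode (run.map (fun t => t.2.1)) :: p.1, bMode (run.map (fun t => t.2.2)) :: p.2)
termination_by l => l.length
decreasing_by
  simp only [List.length_cons]
  exact Nat.lt_succ_of_le (List.length_dropWhile_le _ _)

def group_label_alt (pids : List Int) (preds : List Int) (gt : List Int) : List Int × List Int :=
  runScan (PySem.List.sorted (pids.zip (preds.zip gt)) (fun t => t.1))

-- ===== PRECONDITION & SPEC =====
-- A indexes preds[i] and gt[i] for every i < len(pids): it raises IndexError iff one of them
-- is shorter than pids. Pre_ excludes exactly those inputs (see Raises_ below).
def Pre_group_label (pids : List Int) (preds : List Int) (gt : List Int) : Prop :=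
  pids.length ≤ preds.length ∧ pids.length ≤ gt.length
instance (pids : List Int) (preds : List Int) (gt : List Int) : Decidable (Pre_group_label pids preds gt) := by unfold Pre_group_label; infer_instance

def pvWitness_group_label : List Int × List Int × List Int := ([1, 2, 1], [0, 1, 0], [1, 1, 0])

def Spec_group_label (pids : List Int) (preds : List Int) (gt : List Int) (out : List Int × List Int) : Prop := out = group_label_alt pids preds gt
instance (pids : List Int) (preds : List Int) (gt : List Int) (out : List Int × List Int) : Decidable (Spec_group_label pids preds gt out) := by unfold Spec_group_label; infer_instance

-- ===== CLAIM (what is proved, stated in full; the proofs are below) =====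
def Claim_equal_group_label : Prop := ∀ (pids : List Int) (preds : List Int) (gt : List Int), Dom_group_label pids preds gt → Pre_group_label pids preds gt → Spec_group_label pids preds gt (group_label pids preds gt)

-- ===== LEMMAS AND PROOFS =====

-- the per-pid groups both programs compute, as filters of the zipped triples
def grp (zs : List (Int × Int × Int)) (k : Int) : List (Int × Int × Int) :=
  zs.filter (fun t => t.1 == k)

-- groups laid out contiguously in key order: the shape of a stable sort by key
def blocks (ks : List Int) (zs : List (Int × Int × Int)) : List (Int × Int × Int) :=
  ks.flatMap (fun k => grp zs k)

-- the shared first-strict-max selection step, keyed by a score f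
def pick (f : Int → Int) (acc : Int × Int) (x : Int) : Int × Int :=
  if acc.2 < f x then (x, f x) else acc

-- mostCommon1's fold step, rebased from (key, count) items to keys scored by f
def gOpt (f : Int → Int) (acc : Option (Int × Int)) (k : Int) : Option (Int × Int) :=
  match acc with
  | none => some (k, f k)
  | some bc => if bc.2 < f k then some (k, f k) else some bc

theorem runScan_cons (r : Int × Int × Int) (rest : List (Int × Int × Int)) :
    runScan (r :: rest) =
      (bMode (((r :: rest.takeWhile (fun t => t.1 == r.1))).map (fun t => t.2.1)) :: (runScan (rest.dropWhile (fun t => t.1 == r.1))).1,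
       bMode (((r :: rest.takeWhile (fun t => t.1 == r.1))).map (fun t => t.2.2)) :: (runScan (rest.dropWhile (fun t => t.1 == r.1))).2) := by
  rw [runScan]

theorem blocks_append (ks1 ks2 : List Int) (zs : List (Int × Int × Int)) :
    blocks (ks1 ++ ks2) zs = blocks ks1 zs ++ blocks ks2 zs := by
  simp [blocks]

theorem blocks_cons (k : Int) (ks : List Int) (zs : List (Int × Int × Int)) :
    blocks (k :: ks) zs = grp zs k ++ blocks ks zs := rfl

theorem fst_mem_of_mem_grp {zs : List (Int × Int × Int)} {k : Int} {x : Int × Int × Int}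
    (h : x ∈ grp zs k) : x.1 = k := by
  have := List.of_mem_filter h
  simpa using this

theorem fst_mem_of_mem_blocks {ks : List Int} {zs : List (Int × Int × Int)} {x : Int × Int × Int}
    (h : x ∈ blocks ks zs) : x.1 ∈ ks := by
  simp only [blocks, List.mem_flatMap] at h
  obtain ⟨k, hk, hx⟩ := h
  rw [fst_mem_of_mem_grp hx]; exact hk

theorem grp_append_singleton_ne (zs : List (Int × Int × Int)) (t : Int × Int × Int) (k : Int)
    (h : t.1 ≠ k) : grp (zs ++ [t]) k = grp zs k := by
  simp [grp, List.filter_append, h]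

theorem grp_append_singleton_self (zs : List (Int × Int × Int)) (t : Int × Int × Int) :
    grp (zs ++ [t]) t.1 = grp zs t.1 ++ [t] := by
  simp [grp, List.filter_append]

theorem blocks_append_singleton_ne (ks : List Int) (zs : List (Int × Int × Int))
    (t : Int × Int × Int) (h : ∀ k ∈ ks, t.1 ≠ k) : blocks ks (zs ++ [t]) = blocks ks zs := by
  simp only [blocks]
  induction ks with
  | nil => rfl
  | cons k ks ih =>
    simp only [List.flatMap_cons]
    rw [grp_append_singleton_ne zs t k (h k (by simp)), ih (fun k' hk' => h k' (by simp [hk']))]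

theorem myIns1 {α : Type} (before : α → α → Bool) (t : α) :
    ∀ (X Y : List α), (∀ x ∈ X, before t x = false) → (∀ y ∈ Y, before t y = true) →
    PySem.List.insertBy before t (X ++ Y) = X ++ t :: Y := by
  intro X
  induction X with
  | nil =>
    intro Y _ hY
    cases Y with
    | nil => rfl
    | cons y Y =>
      simp only [List.nil_append]
      simp [PySem.List.insertBy, hY y (by simp)]
  | cons x X ih =>
    intro Y hX hY
    simp only [List.cons_append]
    simp [PySem.List.insertBy, hX x (by simp)]
    exact ih Y (fun z hz => hX z (by simp [hz])) hY


theorem grp_eq_nil {zs : List (Int × Int × Int)} {c : Int}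
    (h : c ∉ zs.map (fun t => t.1)) : grp zs c = [] := by
  rw [grp, List.filter_eq_nil_iff]
  intro a ha hc
  exact h (List.mem_map.2 ⟨a, ha, by simpa using hc⟩)

theorem sorted_key_eq_blocks (zs : List (Int × Int × Int)) :
    PySem.List.sorted zs (fun t => t.1) =
      blocks (PySem.List.sorted (PySem.Set.ofList (zs.map (fun t => t.1))) (fun x => x)) zs := by
  induction zs using List.reverseRecOn with
  | nil => rfl
  | append_singleton zs t ih =>
    set key : (Int × Int × Int) → Int := fun t => t.1 with hkey
    set c : Int := t.1 with hc
    set ups := PySem.List.sorted (PySem.Set.ofList (zs.map key)) (fun x => x) with hups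
    have hpw : ups.Pairwise (· < ·) := PySem.List.sorted_ofList_pairwise_lt _
    set L := ups.takeWhile (fun k => decide (k < c)) with hLdef
    set R := ups.dropWhile (fun k => decide (k < c)) with hRdef
    have hLR : L ++ R = ups := List.takeWhile_append_dropWhile
    have hL : ∀ k ∈ L, k < c := fun k hk => by simpa using List.mem_takeWhile_imp hk
    have hpwR : R.Pairwise (· < ·) := List.Pairwise.sublist (List.dropWhile_sublist _) hpw
    have hpwL : L.Pairwise (· < ·) := List.Pairwise.sublist (List.takeWhile_sublist _) hpw
    have hmap : (zs ++ [t]).map key = zs.map key ++ [c] := by simp [hkey, hc]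
    have hRge : ∀ y ∈ R, c ≤ y := by
      intro y hy
      have hRne : R ≠ [] := by intro h; rw [h] at hy; exact absurd hy (List.not_mem_nil)
      obtain ⟨rh, R', hR⟩ := List.exists_cons_of_ne_nil hRne
      have hhead : ¬ (rh < c) := by
        have hw : ups.dropWhile (fun k => decide (k < c)) ≠ [] := by rw [← hRdef]; exact hRne
        have := List.head_dropWhile_not (fun k => decide (k < c)) hw
        have hh : (ups.dropWhile (fun k => decide (k < c))).head hw = rh := by
          have : R.head hRne = rh := by simp [hR]
          simpa [← hRdef] using this
        rw [hh] at this
        simpa using this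
      have hpwR' := hpwR
      rw [hR] at hpwR'
      rw [hR] at hy
      rcases List.mem_cons.1 hy with h | h
      · omega
      · have : rh < y := (List.pairwise_cons.1 hpwR').1 y h
        omega
    have hsort : PySem.List.sorted (zs ++ [t]) key
        = PySem.List.insertBy (fun a b => decide (key a < key b)) t (PySem.List.sorted zs key) := by
      rw [PySem.List.sorted_eq_foldl_insertBy, PySem.List.sorted_eq_foldl_insertBy, List.foldl_append]
      rfl
    have hmemL_blocks : ∀ x ∈ blocks L zs, (fun a b => decide (key a < key b)) t x = false := by
      intro x hx
      have := hL _ (fst_mem_of_mem_blocks hx)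
      simp only [hkey]; simp; omega
    by_cases hcmem : c ∈ ups
    · -- existing pid: R begins with c, t joins the end of its block
      have hcR : c ∈ R := by
        have hm : c ∈ L ++ R := by rw [hLR]; exact hcmem
        rcases List.mem_append.1 hm with h | h
        · exact absurd (hL c h) (lt_irrefl c)
        · exact h
      have hRne : R ≠ [] := by intro h; rw [h] at hcR; exact absurd hcR (List.not_mem_nil)
      obtain ⟨rh, R', hR⟩ := List.exists_cons_of_ne_nil hRne
      have hpwR' := hpwR
      rw [hR] at hpwR'
      have hcR' := hcR
      rw [hR] at hcR'
      have hrh : rh = c := by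
        have h1 : c ≤ rh := hRge rh (by rw [hR]; simp)
        rcases List.mem_cons.1 hcR' with h | h
        · omega
        · have : rh < c := (List.pairwise_cons.1 hpwR').1 c h
          omega
      subst hrh
      have hR' : ∀ y ∈ R', c < y := (List.pairwise_cons.1 hpwR').1
      have hupsLR : ups = L ++ c :: R' := by rw [← hLR, hR]
      have hofl : PySem.Set.ofList ((zs ++ [t]).map key) = PySem.Set.ofList (zs.map key) := by
        rw [hmap, PySem.Set.ofList_append_singleton]
        apply PySem.Set.add_of_mem
        have h' : c ∈ ups := hcmem
        rw [hups, PySem.List.mem_sorted] at h'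
        exact h'
      rw [hsort, ih, hofl, ← hups, hupsLR]
      rw [blocks_append, blocks_cons]
      have hX : ∀ x ∈ blocks L zs ++ grp zs c, (fun a b => decide (key a < key b)) t x = false := by
        intro x hx
        rcases List.mem_append.1 hx with h | h
        · exact hmemL_blocks x h
        · have := fst_mem_of_mem_grp h
          simp only [hkey]; simp; omega
      have hY : ∀ y ∈ blocks R' zs, (fun a b => decide (key a < key b)) t y = true := by
        intro y hy
        have := hR' _ (fst_mem_of_mem_blocks hy)
        simp only [hkey]; simp; omega
      have hins := myIns1 (fun a b => decide (key a < key b)) t (blocks L zs ++ grp zs c) (blocks R' zs) hX hY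
      rw [← List.append_assoc, hins]
      rw [blocks_append, blocks_cons]
      rw [blocks_append_singleton_ne L zs t (fun k hk => by have := hL k hk; omega)]
      rw [blocks_append_singleton_ne R' zs t (fun k hk => by have := hR' k hk; omega)]
      have hself : grp (zs ++ [t]) c = grp zs c ++ [t] := by
        have h' := grp_append_singleton_self zs t
        rwa [← hc] at h'
      rw [hself]
      simp
    · -- fresh pid: t forms a new singleton block between L and R
      have hRgt : ∀ y ∈ R, c < y := by
        intro y hy
        have h1 := hRge y hy
        have h2 : y ∈ ups := hLR ▸ List.mem_append.2 (Or.inr hy)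
        have h3 : y ≠ c := by intro h; rw [h] at h2; exact hcmem h2
        omega
      have hfresh : c ∉ PySem.Set.ofList (zs.map key) := by
        intro h
        exact hcmem (by rw [hups, PySem.List.mem_sorted]; exact h)
      have hofl : PySem.Set.ofList ((zs ++ [t]).map key) = PySem.Set.ofList (zs.map key) ++ [c] := by
        rw [hmap, PySem.Set.ofList_append_singleton]
        simp only [PySem.Set.add, PySem.Set.contains]
        rw [if_neg (by simpa using hfresh)]
      have hperm : (L ++ c :: R).Perm (PySem.Set.ofList (zs.map key) ++ [c]) := by
        refine List.Perm.trans List.perm_middle ?_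
        rw [hLR]
        refine List.Perm.trans ?_ (List.perm_append_singleton c _).symm
        exact List.Perm.cons c (PySem.List.sorted_perm (PySem.Set.ofList (zs.map key)) (fun x => x) false)
      have hpairw : List.Pairwise (fun a b => a < b) (L ++ c :: R) := by
        rw [List.pairwise_append]
        refine ⟨hpwL, List.pairwise_cons.2 ⟨hRgt, hpwR⟩, ?_⟩
        intro a ha b hb
        have haC := hL a ha
        rcases List.mem_cons.1 hb with h | h
        · omega
        · have := hRgt b h; omega
      have hups' : PySem.List.sorted (PySem.Set.ofList (zs.map key) ++ [c]) (fun x => x) = L ++ c :: R :=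
        PySem.List.sorted_eq_of_perm_of_pairwise_lt (PySem.Set.ofList (zs.map key) ++ [c]) (L ++ c :: R) (fun x => x) hperm hpairw
      rw [hsort, ih, hofl, hups', ← hLR]
      rw [blocks_append]
      have hY : ∀ y ∈ blocks R zs, (fun a b => decide (key a < key b)) t y = true := by
        intro y hy
        have := hRgt _ (fst_mem_of_mem_blocks hy)
        simp only [hkey]; simp; omega
      rw [myIns1 (fun a b => decide (key a < key b)) t (blocks L zs) (blocks R zs) hmemL_blocks hY]
      rw [blocks_append, blocks_cons]
      rw [blocks_append_singleton_ne L zs t (fun k hk => by have := hL k hk; omega)]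
      rw [blocks_append_singleton_ne R zs t (fun k hk => by have := hRgt k hk; omega)]
      have hgrpt : grp (zs ++ [t]) c = [t] := by
        have h1 := grp_append_singleton_self zs t
        have h2 : grp zs c = [] := grp_eq_nil (by
          intro h
          exact hfresh ((PySem.Set.mem_ofList _ _).2 h))
        rw [← hc] at h1
        rw [h1, h2]; rfl
      rw [hgrpt]
      simp

theorem tw_append {α : Type} (p : α → Bool) :
    ∀ (X Y : List α), (∀ x ∈ X, p x = true) → (∀ y ∈ Y, p y = false) →
    (X ++ Y).takeWhile p = X ∧ (X ++ Y).dropWhile p = Y := by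
  intro X
  induction X with
  | nil =>
    intro Y _ hY
    cases Y with
    | nil => simp
    | cons y Y => simp [hY y (by simp)]
  | cons x X ih =>
    intro Y hX hY
    have hx := hX x (by simp)
    have := ih Y (fun z hz => hX z (by simp [hz])) hY
    simp [hx, this.1, this.2]

theorem runScan_blocks : ∀ (ks : List Int) (zs : List (Int × Int × Int)),
    ks.Pairwise (· < ·) → (∀ k ∈ ks, grp zs k ≠ []) →
    runScan (blocks ks zs) =
      (ks.map (fun k => bMode ((grp zs k).map (fun t => t.2.1))),
       ks.map (fun k => bMode ((grp zs k).map (fun t => t.2.2)))) := by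
  intro ks
  induction ks with
  | nil => intro zs _ _; simp [blocks, runScan]
  | cons k ks ih =>
    intro zs hpw hne
    obtain ⟨g0, G, hG⟩ := List.exists_cons_of_ne_nil (hne k (by simp))
    have hg0 : g0.1 = k := fst_mem_of_mem_grp (by rw [hG]; simp)
    have hGall : ∀ x ∈ G, (fun t : Int × Int × Int => t.1 == g0.1) x = true := by
      intro x hx
      have : x.1 = k := fst_mem_of_mem_grp (by rw [hG]; simp [hx])
      simp [this, hg0]
    have hrest : ∀ y ∈ blocks ks zs, (fun t : Int × Int × Int => t.1 == g0.1) y = false := by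
      intro y hy
      have h1 := fst_mem_of_mem_blocks hy
      have h2 : k < y.1 := (List.pairwise_cons.1 hpw).1 _ h1
      simp [hg0]; omega
    have htw := tw_append (fun t : Int × Int × Int => t.1 == g0.1) G (blocks ks zs) hGall hrest
    rw [blocks_cons, hG]
    rw [List.cons_append]
    rw [runScan_cons]
    rw [htw.1, htw.2]
    rw [ih zs (List.pairwise_cons.1 hpw).2 (fun k' hk' => hne k' (by simp [hk']))]
    simp [hG]

theorem pick_of_le (f : Int → Int) (acc : Int × Int) (x : Int) (h : f x ≤ acc.2) :
    pick f acc x = acc := by simp [pick]; omega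

theorem le_pick_snd (f : Int → Int) (acc : Int × Int) (x : Int) :
    acc.2 ≤ (pick f acc x).2 ∧ f x ≤ (pick f acc x).2 := by
  simp only [pick]; split <;> simp <;> omega

theorem prefix_foldl_add (l : List Int) : ∀ (s : PySem.Set Int), s <+: l.foldl PySem.Set.add s := by
  induction l with
  | nil => intro s; exact List.prefix_refl s
  | cons x l ih =>
    intro s
    simp only [List.foldl_cons]
    refine List.IsPrefix.trans ?_ (ih (s.add x))
    by_cases hx : x ∈ s
    · rw [PySem.Set.add_of_mem hx]
    · simp only [PySem.Set.add, PySem.Set.contains]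
      rw [if_neg (by simpa using hx)]
      exact List.prefix_append s [x]

theorem pickfold_dedup (f : Int → Int) : ∀ (l : List Int) (s : PySem.Set Int) (acc : Int × Int),
    (∀ x ∈ s, f x ≤ acc.2) →
    l.foldl (pick f) acc = ((l.foldl PySem.Set.add s).drop s.length).foldl (pick f) acc := by
  intro l
  induction l with
  | nil => intro s acc _; simp
  | cons x l ih =>
    intro s acc h
    simp only [List.foldl_cons]
    by_cases hx : x ∈ s
    · rw [PySem.Set.add_of_mem hx, pick_of_le f acc x (h x hx)]
      exact ih s acc h
    · have hadd : PySem.Set.add s x = s ++ [x] := by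
        simp [PySem.Set.add, PySem.Set.contains]
        intro h'; exact absurd h' hx
      rw [hadd]
      obtain ⟨T, hT⟩ := prefix_foldl_add l (s ++ [x])
      have hT' : List.foldl PySem.Set.add (s ++ [x]) l = s ++ x :: T := by
        rw [← hT]; simp
      rw [hT']
      have hdrop : (s ++ x :: T).drop s.length = x :: T := List.drop_left
      rw [hdrop]
      simp only [List.foldl_cons]
      have h' : ∀ y ∈ s ++ [x], f y ≤ (pick f acc x).2 := by
        intro y hy
        rcases List.mem_append.1 hy with hy | hy
        · exact le_trans (h y hy) (le_pick_snd f acc x).1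
        · have hyx : y = x := by simpa using hy
          subst hyx; exact (le_pick_snd f acc y).2
      have hih := ih (s ++ [x]) (pick f acc x) h'
      rw [hT'] at hih
      have hdrop2 : (s ++ x :: T).drop (s.length + 1) = T := by
        have he : s ++ x :: T = (s ++ [x]) ++ T := by simp
        have hl : s.length + 1 = (s ++ [x]).length := by simp
        rw [he, hl]; exact List.drop_left
      have hlen : (s ++ [x]).length = s.length + 1 := by simp
      rw [hlen, hdrop2] at hih
      exact hih



theorem optfold_some (f : Int → Int) : ∀ (l : List Int) (b : Int × Int),
    l.foldl (gOpt f) (some b) = some (l.foldl (pick f) b) := by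
  intro l
  induction l with
  | nil => intro b; rfl
  | cons x l ih =>
    intro b
    simp only [List.foldl_cons]
    have : gOpt f (some b) x = some (pick f b x) := by
      simp only [gOpt, pick]; split <;> rfl
    rw [this, ih]

theorem mode_eq (v : List Int) (hv : v ≠ []) : mostCommon1 v = bMode v := by
  have hcounts : v.foldl (fun d x => d.insert x (d.getD x 0 + 1)) PySem.Dict.empty = PySem.Dict.counter v :=
    PySem.Dict.foldl_insert_getD_add_one_eq_counter v
  have hb : bMode v = (v.foldl (pick (fun k => (List.count k v : Int))) (0, -1)).1 := by
    simp only [bMode, hcounts, PySem.Dict.getD_counter]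
    rfl
  have hm : mostCommon1 v =
      ((PySem.Set.ofList v).foldl (gOpt (fun k => (List.count k v : Int))) none).elim 0 (fun bc => bc.1) := by
    unfold mostCommon1
    rw [PySem.Dict.items_counter, List.foldl_map]
    rfl
  -- dedup the pick fold
  have hdedup : v.foldl (pick (fun k => (List.count k v : Int))) (0, -1)
      = (PySem.Set.ofList v).foldl (pick (fun k => (List.count k v : Int))) (0, -1) := by
    have := pickfold_dedup (fun k => (List.count k v : Int)) v [] (0, -1) (by simp)
    simpa [PySem.Set.ofList] using this
  set f := fun k => (List.count k v : Int) with hf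
  obtain ⟨u0, u', hu⟩ : ∃ u0 u', PySem.Set.ofList v = u0 :: u' := by
    cases h : PySem.Set.ofList v with
    | nil =>
      exfalso
      obtain ⟨z, zv⟩ := List.exists_mem_of_ne_nil v hv
      have : z ∈ PySem.Set.ofList v := (PySem.Set.mem_ofList v z).2 zv
      rw [h] at this; exact absurd this (List.not_mem_nil)
    | cons a b => exact ⟨a, b, rfl⟩
  have hcount : (0:Int) < f u0 := by
    have : u0 ∈ v := (PySem.Set.mem_ofList v u0).1 (by rw [hu]; exact List.mem_cons_self)
    simp only [hf]
    exact_mod_cast List.count_pos_iff.2 this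
  rw [hm, hu, hb, hdedup, hu]
  simp only [List.foldl_cons]
  have h1 : gOpt f none u0 = some (u0, f u0) := rfl
  have h2 : pick f (0, -1) u0 = (u0, f u0) := by
    simp [pick]; omega
  rw [h1, h2, optfold_some]
  rfl

theorem range_fold_eq_zip_fold {St : Type} (pids preds gt : List Int)
    (hp : pids.length ≤ preds.length) (hg : pids.length ≤ gt.length)
    (f : St → (Int × Int × Int) → St) :
    ∀ (m k : Nat), m = pids.length - k → ∀ (st : St),
    (PySem.List.pyRange k (PySem.List.len pids) 1).foldl
      (fun st i => f st (PySem.List.pyGetD pids i 0, PySem.List.pyGetD preds i 0, PySem.List.pyGetD gt i 0)) st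
    = ((pids.zip (preds.zip gt)).drop k).foldl f st := by
  have hzlen : (pids.zip (preds.zip gt)).length = pids.length := by
    simp [List.length_zip]; omega
  intro m
  induction m with
  | zero =>
    intro k hk st
    have hk' : pids.length ≤ k := by omega
    have h1 : PySem.List.pyRange (k : Int) (PySem.List.len pids) 1 = [] := by
      simp [PySem.List.pyRange, PySem.List.len_eq]; omega
    have h2 : (pids.zip (preds.zip gt)).drop k = [] := by
      apply List.drop_eq_nil_of_le; omega
    rw [h1, h2]
    rfl
  | succ m ih =>
    intro k hk st
    have hklt : k < pids.length := by omega
    have h1 : PySem.List.pyRange (k : Int) (PySem.List.len pids) 1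
        = (k : Int) :: PySem.List.pyRange ((k : Int) + 1) (PySem.List.len pids) 1 := by
      apply PySem.List.pyRange_one_cons
      rw [PySem.List.len_eq]; exact_mod_cast hklt
    have hcast : ((k : Int) + 1) = ((k + 1 : Nat) : Int) := by push_cast; ring
    have h2 : (pids.zip (preds.zip gt)).drop k
        = (pids[k]'hklt, (preds[k]'(by omega), gt[k]'(by omega))) :: (pids.zip (preds.zip gt)).drop (k + 1) := by
      rw [List.drop_eq_getElem_cons (by omega)]
      congr 1
      rw [List.getElem_zip, List.getElem_zip]
    rw [h1, h2]
    simp only [List.foldl_cons]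
    rw [hcast, ih (k + 1) (by omega)]
    congr 2
    simp only [PySem.List.pyGetD_natCast]
    rw [List.getD_eq_getElem _ _ hklt,
        List.getD_eq_getElem _ _ (show k < preds.length by omega),
        List.getD_eq_getElem _ _ (show k < gt.length by omega)]

theorem getD_modify_fold (val : (Int × Int × Int) → Int) :
    ∀ (zs : List (Int × Int × Int)) (d : PySem.Dict Int (List Int)) (k : Int),
    (zs.foldl (fun d t => d.modify t.1 [] (fun l => l ++ [val t])) d).getD k []
      = d.getD k [] ++ (grp zs k).map val := by
  intro zs
  induction zs with
  | nil => intro d k; simp [grp]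
  | cons t zs ih =>
    intro d k
    simp only [List.foldl_cons]
    rw [ih]
    by_cases hk : k = t.1
    · subst hk
      rw [PySem.Dict.getD_modify_self]
      simp [grp]
    · rw [PySem.Dict.getD_modify_of_ne _ _ _ hk]
      have : grp (t :: zs) k = grp zs k := by
        simp only [grp, List.filter_cons]
        rw [if_neg (by simp; omega)]
      rw [this]

theorem update_of_subset : ∀ (xs : List Int) (s : PySem.Set Int), (∀ x ∈ xs, x ∈ s) → s.update xs = s := by
  intro xs
  induction xs with
  | nil => intro s _; exact PySem.Set.update_nil s
  | cons x xs ih =>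
    intro s h
    rw [PySem.Set.update_cons, PySem.Set.add_of_mem (h x (by simp))]
    exact ih s (fun y hy => h y (by simp [hy]))


-- dicts initialised with empty lists look up to [] everywhere
theorem getD_nil_items_const (d : PySem.Dict Int (List Int)) (ups : List Int)
    (h : d.items = ups.map (fun k => (k, ([] : List Int)))) (k : Int) : d.getD k [] = [] := by
  rcases hfind : List.find? (fun p => p.1 == k) d.items with _ | p
  · simp [PySem.Dict.getD, PySem.Dict.get?, hfind]
  · have hmem := List.mem_of_find?_eq_some hfind
    rw [h] at hmem
    obtain ⟨k', _, hk'⟩ := List.mem_map.1 hmem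
    have : p.2 = [] := by rw [← hk']
    simp [PySem.Dict.getD, PySem.Dict.get?, hfind, this]

-- ===== VERDICT (by name: the statement is the Claim_ definition above) =====
theorem group_label_spec : Claim_equal_group_label := by
  intro pids preds gt _ hpre
  obtain ⟨hp, hg⟩ := hpre
  unfold Spec_group_label
  have hzfst : (pids.zip (preds.zip gt)).map (fun t => t.1) = pids :=
    List.map_fst_zip (by rw [List.length_zip]; omega)
  have hupsnodup : (PySem.List.sorted (PySem.Set.ofList pids) (fun x => x)).Nodup :=
    ((PySem.List.sorted_perm _ _ _).nodup_iff).2 (PySem.Set.nodup_ofList pids)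
  have hmemups : ∀ x ∈ pids, x ∈ PySem.List.sorted (PySem.Set.ofList pids) (fun x => x) := by
    intro x hx
    rw [PySem.List.mem_sorted]
    exact (PySem.Set.mem_ofList _ _).2 hx
  have hgrpne : ∀ k ∈ PySem.List.sorted (PySem.Set.ofList pids) (fun x => x),
      grp (pids.zip (preds.zip gt)) k ≠ [] := by
    intro k hk
    rw [PySem.List.mem_sorted] at hk
    have hkp : k ∈ pids := (PySem.Set.mem_ofList _ _).1 hk
    have : k ∈ (pids.zip (preds.zip gt)).map (fun t => t.1) := by rw [hzfst]; exact hkp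
    obtain ⟨t, ht, hteq⟩ := List.mem_map.1 this
    intro hnil
    have : t ∈ grp (pids.zip (preds.zip gt)) k := List.mem_filter.2 ⟨ht, by simp [hteq]⟩
    rw [hnil] at this
    exact absurd this (List.not_mem_nil)
  -- B computes the per-pid modes over the blocks of the stable sort
  have hB : group_label_alt pids preds gt
      = ((PySem.List.sorted (PySem.Set.ofList pids) (fun x => x)).map
           (fun k => bMode ((grp (pids.zip (preds.zip gt)) k).map (fun t => t.2.1))),
         (PySem.List.sorted (PySem.Set.ofList pids) (fun x => x)).map
           (fun k => bMode ((grp (pids.zip (preds.zip gt)) k).map (fun t => t.2.2)))) := by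
    unfold group_label_alt
    rw [sorted_key_eq_blocks, hzfst]
    exact runScan_blocks _ _ (PySem.List.sorted_ofList_pairwise_lt pids) hgrpne
  rw [hB]
  -- A's initial dict {k: [] for k in unique_pids}
  have hitems0 : ((PySem.List.sorted (PySem.Set.ofList pids) (fun x => x)).foldl
      (fun d k => d.insert k ([] : List Int)) PySem.Dict.empty).items
      = (PySem.List.sorted (PySem.Set.ofList pids) (fun x => x)).map (fun k => (k, ([] : List Int))) := by
    have := PySem.Dict.items_foldl_insert_fresh (PySem.List.sorted (PySem.Set.ofList pids) (fun x => x))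
      (fun x => x) (fun _ => ([] : List Int)) PySem.Dict.empty
      (fun a _ => PySem.Dict.contains_empty a) (by simpa using hupsnodup)
    simpa using this
  have hkeys0 : ((PySem.List.sorted (PySem.Set.ofList pids) (fun x => x)).foldl
      (fun d k => d.insert k ([] : List Int)) PySem.Dict.empty).keys
      = PySem.List.sorted (PySem.Set.ofList pids) (fun x => x) := by
    simp [PySem.Dict.keys, hitems0, Function.comp_def]
  -- the index loop is the fold of the zipped triples
  have hloop := range_fold_eq_zip_fold pids preds gt hp hg
      (fun (st : PySem.Dict Int (List Int) × PySem.Dict Int (List Int)) t =>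
        (st.1.modify t.1 [] (fun l => l ++ [t.2.1]), st.2.modify t.1 [] (fun l => l ++ [t.2.2])))
      pids.length 0 (by omega)
      ((PySem.List.sorted (PySem.Set.ofList pids) (fun x => x)).foldl
          (fun d k => d.insert k ([] : List Int)) PySem.Dict.empty,
       (PySem.List.sorted (PySem.Set.ofList pids) (fun x => x)).foldl
          (fun d k => d.insert k ([] : List Int)) PySem.Dict.empty)
  simp only [Nat.cast_zero, List.drop_zero] at hloop
  have hsplit := PySem.List.foldl_prod_mk
      (fun (d : PySem.Dict Int (List Int)) (t : Int × Int × Int) => d.modify t.1 [] (fun l => l ++ [t.2.1]))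
      (fun (d : PySem.Dict Int (List Int)) (t : Int × Int × Int) => d.modify t.1 [] (fun l => l ++ [t.2.2]))
      (pids.zip (preds.zip gt))
      ((PySem.List.sorted (PySem.Set.ofList pids) (fun x => x)).foldl
          (fun d k => d.insert k ([] : List Int)) PySem.Dict.empty)
      ((PySem.List.sorted (PySem.Set.ofList pids) (fun x => x)).foldl
          (fun d k => d.insert k ([] : List Int)) PySem.Dict.empty)
  beta_reduce at hsplit
  rw [hsplit] at hloop
  show (let unique_pids := PySem.List.sorted (PySem.Set.ofList pids) (fun x => x);
        let pred_dic := unique_pids.foldl (fun d k => d.insert k ([] : List Int)) PySem.Dict.empty;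
        let gt_dic := unique_pids.foldl (fun d k => d.insert k ([] : List Int)) PySem.Dict.empty;
        let dics := (PySem.List.pyRange 0 (PySem.List.len pids)).foldl
          (fun (st : PySem.Dict Int (List Int) × PySem.Dict Int (List Int)) i =>
            (st.1.modify (PySem.List.pyGetD pids i 0) [] (fun l => l ++ [PySem.List.pyGetD preds i 0]),
             st.2.modify (PySem.List.pyGetD pids i 0) [] (fun l => l ++ [PySem.List.pyGetD gt i 0])))
          (pred_dic, gt_dic);
        let final_preds := dics.1.items.foldl (fun acc kv => acc ++ [mostCommon1 kv.2]) [];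
        let final_gt := dics.2.items.foldl (fun acc kv => acc ++ [mostCommon1 kv.2]) [];
        (final_preds, final_gt)) = _
  simp only []
  rw [hloop]
  -- each final dict: keys are the sorted unique pids, values the per-pid groups
  have hkeys1 : ∀ (val : (Int × Int × Int) → Int),
      ((pids.zip (preds.zip gt)).foldl
        (fun d t => d.modify t.1 [] (fun l => l ++ [val t]))
        ((PySem.List.sorted (PySem.Set.ofList pids) (fun x => x)).foldl
          (fun d k => d.insert k ([] : List Int)) PySem.Dict.empty)).keys
      = PySem.List.sorted (PySem.Set.ofList pids) (fun x => x) := by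
    intro val
    rw [PySem.Dict.keys_foldl_modify_key (pids.zip (preds.zip gt)) (fun t => t.1) []
      (fun _ t => fun l => l ++ [val t])]
    rw [hkeys0, hzfst]
    exact update_of_subset pids _ hmemups
  have hitems1 : ∀ (val : (Int × Int × Int) → Int),
      ((pids.zip (preds.zip gt)).foldl
        (fun d t => d.modify t.1 [] (fun l => l ++ [val t]))
        ((PySem.List.sorted (PySem.Set.ofList pids) (fun x => x)).foldl
          (fun d k => d.insert k ([] : List Int)) PySem.Dict.empty)).items
      = (PySem.List.sorted (PySem.Set.ofList pids) (fun x => x)).map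
          (fun k => (k, (grp (pids.zip (preds.zip gt)) k).map val)) := by
    intro val
    rw [PySem.Dict.items_eq_map_keys _ (by rw [hkeys1 val]; exact hupsnodup) ([] : List Int)]
    rw [hkeys1 val]
    apply List.map_congr_left
    intro k _
    rw [getD_modify_fold]
    rw [getD_nil_items_const _ _ hitems0 k]
    simp
  rw [PySem.List.foldl_append_singleton_eq_map (fun kv : Int × List Int => mostCommon1 kv.2)]
  rw [PySem.List.foldl_append_singleton_eq_map (fun kv : Int × List Int => mostCommon1 kv.2)]
  rw [hitems1 (fun t => t.2.1), hitems1 (fun t => t.2.2)]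
  rw [List.map_map, List.map_map, Prod.mk.injEq]
  constructor <;> · 
    simp only [List.nil_append, Function.comp_def]
    apply List.map_congr_left
    intro k hk
    apply mode_eq
    intro hnil
    exact hgrpne k hk (by simpa using hnil)
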